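-- pv_equiv track=rewrite | github.com/dwido906/THOR | thor_os_tabby_ml.py | _remove_sensitive_comments
-- ===== SOURCE A (Python) =====
-- def _remove_sensitive_comments(code: str, language: str) -> str:
--     """Remove comments that might contain sensitive information"""
--     lines = code.split('\n')
--     cleaned_lines = []
--
--     for line in lines:
--         # Detect comment patterns
--         if language.lower() in ['python', 'bash', 'ruby']:
--             comment_start = line.find('#')
--         elif language.lower() in ['javascript', 'java', 'c', 'cpp', 'go']:
--             comment_start = line.find('//')
--         else:
--             comment_start = -1
--
--         if comment_start != -1:
--             # Check if comment contains potential PII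
--             comment = line[comment_start:].lower()
--             sensitive_patterns = [
--                 'password', 'key', 'secret', 'token', 'auth', 'login',
--                 'email', 'phone', 'address', 'name', 'user', 'admin',
--                 'todo', 'fixme', 'hack', 'temp'
--             ]
--
--             has_sensitive = any(pattern in comment for pattern in sensitive_patterns)
--
--             if has_sensitive:
--                 # Replace with generic comment
--                 line = line[:comment_start] + "# [anonymized comment]"
--
--         cleaned_lines.append(line)
--
--     return '\n'.join(cleaned_lines)
-- ===== SOURCE B (Python) =====
-- _SENSITIVE_PATTERNS = (
--     'password', 'key', 'secret', 'token', 'auth', 'login',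
--     'email', 'phone', 'address', 'name', 'user', 'admin',
--     'todo', 'fixme', 'hack', 'temp'
-- )
--
--
-- def _flush(head, comment):
--     """Emit one finished line from the scanner state."""
--     if comment is None:
--         return head
--     if any(p in ''.join(comment).lower() for p in _SENSITIVE_PATTERNS):
--         return head + list("# [anonymized comment]")
--     return head + comment
--
--
-- def _remove_sensitive_comments(code: str, language: str) -> str:
--     """Remove comments that might contain sensitive information.
--
--     Single-pass state machine over the whole string: scans character by
--     character, switching into comment mode at the first marker of a line,
--     and flushes each line at '\n' / end of input.
--     """
--     lang = language.lower()
--     if lang in ('python', 'bash', 'ruby'):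
--         marker = '#'
--     elif lang in ('javascript', 'java', 'c', 'cpp', 'go'):
--         marker = '//'
--     else:
--         return code
--
--     out = []
--     head = []        # chars of the current line before its comment
--     comment = None   # None = not in a comment; else chars of the comment
--     i, n = 0, len(code)
--     while i < n:
--         ch = code[i]
--         if ch == '\n':
--             out += _flush(head, comment)
--             out.append('\n')
--             head, comment = [], None
--             i += 1
--         elif comment is not None:
--             comment.append(ch)
--             i += 1
--         elif code.startswith(marker, i):
--             comment = list(marker)
--             i += len(marker)
--         else:
--             head.append(ch)
--             i += 1
--     out += _flush(head, comment)
--     return ''.join(out)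
-- ===== Notes on version B (the rewrite author's own statement) =====
-- stated objective: alternative
-- what changed: B replaces A's split('\n') + per-line find/slice/join with a single left-to-right character scan over the whole string: a state machine that enters comment mode at the first marker of each line and flushes lines at newlines, with an up-front marker choice that returns code unchanged for unrecognized languages.
import Mathlib
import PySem

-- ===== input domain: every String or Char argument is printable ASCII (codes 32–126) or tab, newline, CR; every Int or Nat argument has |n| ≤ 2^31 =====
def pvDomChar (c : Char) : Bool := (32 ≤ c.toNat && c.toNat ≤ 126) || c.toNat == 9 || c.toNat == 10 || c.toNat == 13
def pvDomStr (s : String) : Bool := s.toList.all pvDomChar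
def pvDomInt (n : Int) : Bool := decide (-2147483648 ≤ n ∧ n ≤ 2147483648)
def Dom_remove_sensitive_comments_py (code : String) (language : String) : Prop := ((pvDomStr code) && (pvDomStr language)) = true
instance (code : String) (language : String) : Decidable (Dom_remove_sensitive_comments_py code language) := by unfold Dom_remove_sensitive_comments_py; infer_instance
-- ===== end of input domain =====

-- B replaces A's split/per-line-find/join with a single character-level scan of the whole
-- string (a state machine: head/comment buffers, flushed at each newline); objective: alternative.

-- ===== PORT A =====
def pvPatternsA : List (List Char) :=
  ["password".toList, "key".toList, "secret".toList, "token".toList, "auth".toList, "login".toList,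
   "email".toList, "phone".toList, "address".toList, "name".toList, "user".toList, "admin".toList,
   "todo".toList, "fixme".toList, "hack".toList, "temp".toList]

-- one loop body of A: pick comment_start by language, then test and maybe replace the line
def pvLineA (language : List Char) (line : List Char) : List Char :=
  let comment_start : Int :=
    if PySem.Chars.lower language ∈ ["python".toList, "bash".toList, "ruby".toList] then
      PySem.Chars.find line "#".toList
    else if PySem.Chars.lower language ∈ ["javascript".toList, "java".toList, "c".toList, "cpp".toList, "go".toList] then
      PySem.Chars.find line "//".toList
    else (-1 : Int)
  if comment_start ≠ -1 then
    if pvPatternsA.any (fun p => PySem.Chars.isIn p (PySem.Chars.lower (PySem.Chars.slice line (some comment_start) none))) then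
      PySem.Chars.slice line none (some comment_start) ++ "# [anonymized comment]".toList
    else line
  else line

def remove_sensitive_comments_py (code : String) (language : String) : String :=
  let lines := PySem.Chars.splitOn code.toList "\n".toList
  let cleaned_lines := lines.foldl (fun acc line => acc ++ [pvLineA language.toList line]) []
  String.ofList (PySem.Chars.join "\n".toList cleaned_lines)

-- ===== PORT B =====
def pvPatternsB : List (List Char) :=
  ["password".toList, "key".toList, "secret".toList, "token".toList, "auth".toList, "login".toList,
   "email".toList, "phone".toList, "address".toList, "name".toList, "user".toList, "admin".toList,
   "todo".toList, "fixme".toList, "hack".toList, "temp".toList]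

-- Source B's _flush: emit one finished line from the scanner state
def pvFlush (head : List Char) : Option (List Char) → List Char
  | none => head
  | some cs =>
    if pvPatternsB.any (fun p => PySem.Chars.isIn p (PySem.Chars.lower cs)) then
      head ++ "# [anonymized comment]".toList
    else head ++ cs

-- Source B's while loop: one pass over the characters with state (head, comment, out);
-- code.startswith(marker, i) is marker.isPrefixOf on the remaining characters (exact).
def pvScan (marker : List Char) : List Char → List Char → Option (List Char) → List Char → List Char
  | [], head, com, out => out ++ pvFlush head com
  | c :: rest, head, com, out =>
    if c = '\n' then pvScan marker rest [] none (out ++ pvFlush head com ++ ['\n'])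
    else
      match com with
      | some cs => pvScan marker rest head (some (cs ++ [c])) out
      | none =>
        if marker.isPrefixOf (c :: rest) then
          -- i += len(marker): marker is nonempty at both call sites, so this drop is exact
          pvScan marker (rest.drop (marker.length - 1)) head (some marker) out
        else pvScan marker rest (head ++ [c]) none out
termination_by l => l.length
decreasing_by
  · simp
  · simp
  · simp only [List.length_cons, List.length_drop]
    omega
  · simp

def remove_sensitive_comments_py_alt (code : String) (language : String) : String :=
  let lang := PySem.Chars.lower language.toList
  let marker? : Option (List Char) :=
    if lang ∈ ["python".toList, "bash".toList, "ruby".toList] then some "#".toList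
    else if lang ∈ ["javascript".toList, "java".toList, "c".toList, "cpp".toList, "go".toList] then some "//".toList
    else none
  match marker? with
  | none => code
  | some marker => String.ofList (pvScan marker code.toList [] none [])

-- ===== PRECONDITION & SPEC =====
def Spec_remove_sensitive_comments_py (code : String) (language : String) (out : String) : Prop := out = remove_sensitive_comments_py_alt code language
instance (code : String) (language : String) (out : String) : Decidable (Spec_remove_sensitive_comments_py code language out) := by unfold Spec_remove_sensitive_comments_py; infer_instance

-- ===== CLAIM (what is proved, stated in full; the proofs are below) =====
def Claim_equal_remove_sensitive_comments_py : Prop := ∀ (code : String) (language : String), Dom_remove_sensitive_comments_py code language → Spec_remove_sensitive_comments_py code language (remove_sensitive_comments_py code language)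

-- ===== LEMMAS AND PROOFS =====

-- reference line splitter: the (head, comment) state the scanner is left in by one line
def pvLineSplit (m : List Char) : List Char → List Char × Option (List Char)
  | [] => ([], none)
  | c :: rest =>
    if m.isPrefixOf (c :: rest) then ([], some (m ++ rest.drop (m.length - 1)))
    else
      let p := pvLineSplit m rest
      (c :: p.1, p.2)

def pvLineFn (m : List Char) (l : List Char) : List Char :=
  pvFlush (pvLineSplit m l).1 (pvLineSplit m l).2

-- simple reference for code.split('\n')
def pvLines : List Char → List (List Char)
  | [] => [[]]
  | c :: r => if c = '\n' then [] :: pvLines r else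
      match pvLines r with
      | [] => [[c]]
      | h :: t => (c :: h) :: t

theorem pvLines_ne_nil (s : List Char) : pvLines s ≠ [] := by
  cases s with
  | nil => simp [pvLines]
  | cons c r =>
    simp only [pvLines]
    split
    · simp
    · split <;> simp_all

theorem pvLines_no_newline (l : List Char) (h : '\n' ∉ l) : pvLines l = [l] := by
  induction l with
  | nil => rfl
  | cons c r ih =>
    have hc : c ≠ '\n' := fun e => h (e ▸ List.mem_cons_self ..)
    have hr : '\n' ∉ r := fun hx => h (List.mem_cons_of_mem _ hx)
    simp [pvLines, hc, ih hr]

theorem pvLines_append_newline (l r : List Char) (h : '\n' ∉ l) :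
    pvLines (l ++ '\n' :: r) = l :: pvLines r := by
  induction l with
  | nil => simp [pvLines]
  | cons c l' ih =>
    have hc : c ≠ '\n' := fun e => h (e ▸ List.mem_cons_self ..)
    have hl' : '\n' ∉ l' := fun hx => h (List.mem_cons_of_mem _ hx)
    simp [pvLines, hc, ih hl']

theorem pv_headI_tail {α : Type} [Inhabited α] (l : List α) (h : l ≠ []) :
    l.headI :: l.tail = l := by
  cases l with
  | nil => exact absurd rfl h
  | cons a t => rfl

-- appending elements one by one in a fold is mapping
theorem pv_foldl_push_map {α β : Type} (f : α → β) (xs : List α) (acc : List β) :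
    xs.foldl (fun a x => a ++ [f x]) acc = acc ++ xs.map f := by
  induction xs generalizing acc with
  | nil => simp
  | cons x xs ih => simp [List.foldl, ih]

theorem pv_inter_cons (sep x : List Char) (l : List (List Char)) (h : l ≠ []) :
    sep.intercalate (x :: l) = x ++ sep ++ sep.intercalate l := by
  cases l with
  | nil => exact absurd rfl h
  | cons y t => simp [List.intercalate, List.intersperse, List.append_assoc]

-- splitOn with the single-char separator '\n' is the simple pvLines
theorem pv_splitOn_go_lines :
    ∀ (fuel : Nat) (l cur : List Char) (acc : List (List Char)), l.length ≤ fuel →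
    PySem.Chars.splitOn.go "\n".toList fuel l cur acc =
      acc.reverse ++ (cur.reverse ++ (pvLines l).headI) :: (pvLines l).tail := by
  intro fuel
  induction fuel with
  | zero =>
    intro l cur acc hl
    have : l = [] := List.length_eq_zero_iff.mp (Nat.le_zero.mp hl)
    subst this
    simp [PySem.Chars.splitOn.go, pvLines]
  | succ fuel ih =>
    intro l cur acc hl
    match l with
    | [] => simp [PySem.Chars.splitOn.go, pvLines]
    | c :: rest =>
      rw [PySem.Chars.splitOn.go]
      by_cases hc : c = '\n'
      · subst hc
        have hpre : ("\n".toList).isPrefixOf ('\n' :: rest) = true := by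
          simp [List.isPrefixOf]
        simp only [hpre, if_pos]
        have hlen : (List.drop ("\n".toList).length ('\n' :: rest)).length ≤ fuel := by
          simpa using hl
        rw [ih _ _ _ hlen]
        simp only [pvLines]
        simp [pv_headI_tail _ (pvLines_ne_nil rest)]
      · have hpre : ("\n".toList).isPrefixOf (c :: rest) = false := by
          simp [List.isPrefixOf]
          intro h; exact absurd h.symm hc
        simp only [hpre, Bool.false_eq_true, if_false]
        have hlen : rest.length ≤ fuel := by simp at hl; omega
        rw [ih _ _ _ hlen]
        obtain ⟨h, t, hht⟩ : ∃ h t, pvLines rest = h :: t := by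
          cases hx : pvLines rest with
          | nil => exact absurd hx (pvLines_ne_nil rest)
          | cons a b => exact ⟨a, b, rfl⟩
        simp [pvLines, hc, hht]

theorem pv_splitOn_lines (s : List Char) :
    PySem.Chars.splitOn s "\n".toList = pvLines s := by
  unfold PySem.Chars.splitOn
  rw [pv_splitOn_go_lines _ _ _ _ (Nat.le_succ _)]
  simp [pv_headI_tail _ (pvLines_ne_nil s)]

-- a prefix match cannot straddle the end of a newline-free line
theorem pv_prefix_boundary (m l tail : List Char) (hm : '\n' ∉ m)
    (htail : tail = [] ∨ ∃ r, tail = '\n' :: r) :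
    m <+: (l ++ tail) ↔ m <+: l := by
  constructor
  · intro hp
    by_cases hlen : m.length ≤ l.length
    · have h1 : m = List.take m.length (l ++ tail) := List.prefix_iff_eq_take.mp hp
      rw [List.take_append_of_le_length hlen] at h1
      simpa [← h1] using List.take_prefix m.length l
    · exfalso
      rw [Nat.not_le] at hlen
      rcases htail with h0 | ⟨r, hr⟩
      · subst h0
        simp only [List.append_nil] at hp
        have := hp.length_le
        omega
      · subst hr
        have hge := hp.getElem (i := l.length) hlen
        have he : m[l.length]'hlen = '\n' := by simpa using hge
        exact hm (he ▸ List.getElem_mem _)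
  · intro hp
    exact hp.trans (List.prefix_append _ _)

theorem pv_scan_nil (m head : List Char) (com : Option (List Char)) (out : List Char) :
    pvScan m [] head com out = out ++ pvFlush head com := by
  cases com <;> rw [pvScan]

theorem pv_scan_newline (m rest head : List Char) (com : Option (List Char)) (out : List Char) :
    pvScan m ('\n' :: rest) head com out =
      pvScan m rest [] none (out ++ pvFlush head com ++ ['\n']) := by
  cases com <;> rw [pvScan, if_pos rfl]

-- scanning while in comment mode accumulates the rest of the line
theorem pv_scan_comment (m : List Char) :
    ∀ (l tail head cs out : List Char), '\n' ∉ l →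
    pvScan m (l ++ tail) head (some cs) out = pvScan m tail head (some (cs ++ l)) out := by
  intro l
  induction l with
  | nil => intro tail head cs out _; simp
  | cons c l' ih =>
    intro tail head cs out h
    have hc : c ≠ '\n' := fun e => h (e ▸ List.mem_cons_self ..)
    have hl' : '\n' ∉ l' := fun hx => h (List.mem_cons_of_mem _ hx)
    rw [List.cons_append, pvScan, if_neg hc, ih _ _ _ _ hl']
    simp [List.append_assoc]

-- scanning one newline-free line reaches exactly the state pvLineSplit describes
theorem pv_scan_line (m : List Char) (hmn : '\n' ∉ m) :
    ∀ (l tail head out : List Char), '\n' ∉ l →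
    (tail = [] ∨ ∃ r, tail = '\n' :: r) →
    pvScan m (l ++ tail) head none out =
      pvScan m tail (head ++ (pvLineSplit m l).1) (pvLineSplit m l).2 out := by
  intro l
  induction l with
  | nil => intro tail head out _ _; simp [pvLineSplit]
  | cons c l' ih =>
    intro tail head out h htail
    have hc : c ≠ '\n' := fun e => h (e ▸ List.mem_cons_self ..)
    have hl' : '\n' ∉ l' := fun hx => h (List.mem_cons_of_mem _ hx)
    rw [List.cons_append, pvScan, if_neg hc]
    by_cases hpre : m.isPrefixOf (c :: l') = true
    · have hpre2 : m.isPrefixOf (c :: (l' ++ tail)) = true := by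
        rw [List.isPrefixOf_iff_prefix] at hpre ⊢
        exact (pv_prefix_boundary m (c :: l') tail hmn htail).mpr hpre
      simp only [hpre2, if_pos]
      have hlen : m.length - 1 ≤ l'.length := by
        have := (List.isPrefixOf_iff_prefix.mp hpre).length_le
        simp at this
        omega
      rw [List.drop_append_of_le_length hlen]
      rw [pv_scan_comment m (l'.drop (m.length - 1)) tail head m out
          (fun hx => hl' (List.mem_of_mem_drop hx))]
      simp [pvLineSplit, hpre]
    · have hpre2 : m.isPrefixOf (c :: (l' ++ tail)) = false := by
        rw [Bool.eq_false_iff]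
        intro hx
        rw [List.isPrefixOf_iff_prefix] at hx
        exact hpre (by rw [List.isPrefixOf_iff_prefix]
                       exact (pv_prefix_boundary m (c :: l') tail hmn htail).mp (by simpa using hx))
      simp only [hpre2, Bool.false_eq_true, if_false]
      rw [ih tail (head ++ [c]) out hl' htail]
      simp [pvLineSplit, hpre, List.append_assoc]

-- the scanner over the whole string is the per-line map
theorem pv_scan_lines (m : List Char) (hmn : '\n' ∉ m) :
    ∀ (s out : List Char),
    pvScan m s [] none out =
      out ++ List.intercalate "\n".toList ((pvLines s).map (pvLineFn m)) := by
  suffices H : ∀ (n : Nat) (s out : List Char), s.length ≤ n →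
      pvScan m s [] none out =
        out ++ List.intercalate "\n".toList ((pvLines s).map (pvLineFn m)) by
    intro s out
    exact H s.length s out le_rfl
  intro n
  induction n with
  | zero =>
    intro s out hs
    have : s = [] := List.length_eq_zero_iff.mp (Nat.le_zero.mp hs)
    subst this
    simp [pvScan, pvLines, pvLineFn, pvLineSplit, pvFlush, List.intercalate]
  | succ n ih =>
    intro s out hs
    have hdec : s.takeWhile (· ≠ '\n') ++ s.dropWhile (· ≠ '\n') = s :=
      List.takeWhile_append_dropWhile
    have hl : '\n' ∉ s.takeWhile (· ≠ '\n') := by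
      intro hx
      have := List.mem_takeWhile_imp hx
      simp at this
    cases hdrop : s.dropWhile (· ≠ '\n') with
    | nil =>
      have hsEq : s = s.takeWhile (· ≠ '\n') ++ ([] : List Char) := by
        conv_lhs => rw [← hdec, hdrop]
      conv_lhs => rw [hsEq]
      rw [pv_scan_line m hmn _ [] [] out hl (Or.inl rfl), pv_scan_nil]
      conv_rhs => rw [hsEq]
      rw [List.append_nil, pvLines_no_newline _ hl]
      simp [pvLineFn, List.intercalate]
    | cons d r =>
      have hd : d = '\n' := by
        have hne : s.dropWhile (· ≠ '\n') ≠ [] := by rw [hdrop]; simp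
        have := List.head_dropWhile_not (p := (· ≠ '\n')) hne
        simp only [hdrop, List.head_cons] at this
        simpa using this
      subst hd
      have hsEq : s = s.takeWhile (· ≠ '\n') ++ ('\n' :: r) := by
        conv_lhs => rw [← hdec, hdrop]
      conv_lhs => rw [hsEq]
      rw [pv_scan_line m hmn _ ('\n' :: r) [] out hl (Or.inr ⟨r, rfl⟩), pv_scan_newline]
      have hrlen : r.length ≤ n := by
        have h2 : s.length = (s.takeWhile (· ≠ '\n')).length + ('\n' :: r).length := by
          conv_lhs => rw [hsEq]
          simp
        simp at h2
        omega
      rw [ih r _ hrlen]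
      conv_rhs => rw [hsEq]
      rw [pvLines_append_newline _ _ hl, List.map_cons,
          pv_inter_cons _ _ _ (by simp [pvLines_ne_nil])]
      simp [pvLineFn, List.append_assoc]

-- find s sub is characterized as the first occurrence
theorem pv_find_eq (s sub : List Char) (k : Nat) (hk : sub <+: s.drop k)
    (hmin : ∀ i < k, ¬ sub <+: s.drop i) : PySem.Chars.find s sub = (k : Int) := by
  have hin : PySem.Chars.isIn sub s = true :=
    (PySem.Chars.exists_prefix_drop_iff_isIn sub s).mp ⟨k, hk⟩
  have hinf : sub <:+: s := (PySem.Chars.isIn_iff_infix sub s).mp hin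
  have h0 : 0 ≤ PySem.Chars.find s sub := (PySem.Chars.find_nonneg_iff s sub).mpr hinf
  obtain ⟨hp, hmin'⟩ := PySem.Chars.find_spec h0
  have hj : (PySem.Chars.find s sub).toNat = k := by
    rcases Nat.lt_trichotomy (PySem.Chars.find s sub).toNat k with h | h | h
    · exact absurd hp (hmin _ h)
    · exact h
    · exact absurd hk (hmin' _ h)
  omega

-- pvLineSplit computes exactly A's find-based head/comment decomposition
theorem pv_lineSplit_spec (m : List Char) (hm : m ≠ []) (l : List Char) :
    ((pvLineSplit m l).2 = none ∧ (pvLineSplit m l).1 = l ∧ PySem.Chars.find l m = -1) ∨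
    (∃ k : Nat, PySem.Chars.find l m = (k : Int) ∧ (pvLineSplit m l).1 = l.take k ∧
      (pvLineSplit m l).2 = some (l.drop k)) := by
  induction l with
  | nil =>
    left
    refine ⟨rfl, rfl, ?_⟩
    rw [PySem.Chars.find_eq_neg_one_iff]
    simp [List.infix_nil]
    exact hm
  | cons c rest ih =>
    by_cases hpre : m.isPrefixOf (c :: rest) = true
    · right
      refine ⟨0, ?_, ?_, ?_⟩
      · exact pv_find_eq _ _ 0 (by simpa using List.isPrefixOf_iff_prefix.mp hpre)
          (fun i hi => absurd hi (Nat.not_lt_zero i))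
      · simp [pvLineSplit, hpre]
      · have hp := List.isPrefixOf_iff_prefix.mp hpre
        obtain ⟨t, ht⟩ := hp
        have hdrop : rest.drop (m.length - 1) = t := by
          have hdt : List.drop m.length (c :: rest) = t := by rw [← ht, List.drop_left]
          rw [← hdt]
          cases m with
          | nil => exact absurd rfl hm
          | cons a b => simp
        simp [pvLineSplit, hpre, hdrop, ht]
    · have hnp : ¬ m <+: (c :: rest) := fun hx => by
        rw [← List.isPrefixOf_iff_prefix] at hx
        exact absurd hx (by simp [hpre])
      rcases ih with ⟨h2, h1, hf⟩ | ⟨k, hf, h1, h2⟩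
      · left
        refine ⟨?_, ?_, ?_⟩
        · simp [pvLineSplit, hpre, h2]
        · simp [pvLineSplit, hpre, h1]
        · rw [PySem.Chars.find_eq_neg_one_iff]
          intro hinf
          have hnr : ¬ m <:+: rest := (PySem.Chars.find_eq_neg_one_iff rest m).mp hf
          obtain ⟨j, hj⟩ := (PySem.Chars.exists_prefix_drop_iff_isIn m (c :: rest)).mpr
            ((PySem.Chars.isIn_iff_infix m (c :: rest)).mpr hinf)
          match j with
          | 0 => exact hnp (by simpa using hj)
          | j + 1 =>
            exact hnr ((PySem.Chars.isIn_iff_infix m rest).mp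
              ((PySem.Chars.exists_prefix_drop_iff_isIn m rest).mp ⟨j, by simpa using hj⟩))
      · right
        have h0 : 0 ≤ PySem.Chars.find rest m := by rw [hf]; positivity
        obtain ⟨hp, hmin⟩ := PySem.Chars.find_spec h0
        rw [hf] at hp hmin
        simp only [Int.toNat_natCast] at hp hmin
        refine ⟨k + 1, ?_, ?_, ?_⟩
        · refine pv_find_eq _ _ (k + 1) (by simpa using hp) ?_
          intro i hi
          match i with
          | 0 => simpa using hnp
          | i + 1 => simpa using hmin i (by omega)
        · simp [pvLineSplit, hpre, h1]
        · simp [pvLineSplit, hpre, h2]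

-- A's per-line body, for a fixed marker, is pvLineFn
theorem pv_core (m l : List Char) (hm : m ≠ []) :
    (if PySem.Chars.find l m ≠ -1 then
      if pvPatternsA.any (fun p => PySem.Chars.isIn p (PySem.Chars.lower (PySem.Chars.slice l (some (PySem.Chars.find l m)) none))) then
        PySem.Chars.slice l none (some (PySem.Chars.find l m)) ++ "# [anonymized comment]".toList
      else l
    else l) = pvLineFn m l := by
  rcases pv_lineSplit_spec m hm l with ⟨h2, h1, hf⟩ | ⟨k, hf, h1, h2⟩
  · simp only [hf, ne_eq, not_true_eq_false, if_false, pvLineFn, h2, h1, pvFlush]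
  · have hne : (k : Int) ≠ -1 := by omega
    rw [hf, if_pos hne]
    have hs1 : PySem.Chars.slice l (some ((k : Nat) : Int)) none = l.drop k :=
      PySem.List.slice_from_natCast l k
    have hs2 : PySem.Chars.slice l none (some ((k : Nat) : Int)) = l.take k :=
      PySem.List.slice_to_natCast l k
    rw [hs1, hs2, pvLineFn, h1, h2]
    simp only [pvFlush, pvPatternsA, pvPatternsB]
    split
    · rfl
    · simp

theorem pv_line_py (language l : List Char)
    (h1 : PySem.Chars.lower language ∈ ["python".toList, "bash".toList, "ruby".toList]) :
    pvLineA language l = pvLineFn "#".toList l := by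
  rw [← pv_core "#".toList l (by decide)]
  simp only [pvLineA, if_pos h1]

theorem pv_line_c (language l : List Char)
    (h1 : PySem.Chars.lower language ∉ ["python".toList, "bash".toList, "ruby".toList])
    (h2 : PySem.Chars.lower language ∈ ["javascript".toList, "java".toList, "c".toList, "cpp".toList, "go".toList]) :
    pvLineA language l = pvLineFn "//".toList l := by
  rw [← pv_core "//".toList l (by decide)]
  simp only [pvLineA, if_neg h1, if_pos h2]

theorem pv_line_id (language l : List Char)
    (h1 : PySem.Chars.lower language ∉ ["python".toList, "bash".toList, "ruby".toList])
    (h2 : PySem.Chars.lower language ∉ ["javascript".toList, "java".toList, "c".toList, "cpp".toList, "go".toList]) :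
    pvLineA language l = l := by
  simp only [pvLineA, if_neg h1, if_neg h2]
  simp

-- intercalate over splitOn reassembles the input (unknown-language case)
theorem pv_inter_merge (sep a b : List Char) (xs : List (List Char)) :
    sep.intercalate (xs ++ [a, b]) = sep.intercalate (xs ++ [a ++ sep ++ b]) := by
  induction xs with
  | nil => simp [List.intercalate, List.intersperse, List.append_assoc]
  | cons x xs ih =>
    rw [List.cons_append, List.cons_append, pv_inter_cons _ _ _ (by simp),
        pv_inter_cons _ _ _ (by simp), ih]

theorem pv_join_splitOn_go (sep : List Char) (hsep : sep ≠ []) :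
    ∀ (fuel : Nat) (l cur : List Char) (acc : List (List Char)), l.length ≤ fuel →
    sep.intercalate (PySem.Chars.splitOn.go sep fuel l cur acc) =
      sep.intercalate (acc.reverse ++ [cur.reverse ++ l]) := by
  intro fuel
  induction fuel with
  | zero =>
    intro l cur acc hl
    have : l = [] := List.length_eq_zero_iff.mp (Nat.le_zero.mp hl)
    subst this
    simp [PySem.Chars.splitOn.go]
  | succ fuel ih =>
    intro l cur acc hl
    match l with
    | [] => simp [PySem.Chars.splitOn.go]
    | c :: rest =>
      rw [PySem.Chars.splitOn.go]
      by_cases hpre : sep.isPrefixOf (c :: rest) = true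
      · simp only [hpre, if_pos]
        have hp : sep <+: (c :: rest) := List.isPrefixOf_iff_prefix.mp hpre
        have hs : 1 ≤ sep.length := by
          cases sep with
          | nil => exact absurd rfl hsep
          | cons a b => simp
        have hlen : (List.drop sep.length (c :: rest)).length ≤ fuel := by
          simp only [List.length_drop]
          simp at hl ⊢
          omega
        rw [ih _ _ _ hlen]
        obtain ⟨t, ht⟩ := hp
        have htd : List.drop sep.length (c :: rest) = t := by
          rw [← ht, List.drop_left]
        rw [htd]
        have hre : (cur.reverse :: acc).reverse ++ [List.reverse [] ++ t] =
            acc.reverse ++ [cur.reverse, t] := by simp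
        rw [hre, pv_inter_merge]
        congr 2
        simp [List.append_assoc, ht]
      · simp only [hpre, if_neg, Bool.false_eq_true, not_false_iff]
        have : rest.length ≤ fuel := by simp at hl; omega
        rw [ih _ _ _ this]
        simp [List.append_assoc]

theorem pv_join_splitOn (s : List Char) :
    PySem.Chars.join "\n".toList (PySem.Chars.splitOn s "\n".toList) = s := by
  unfold PySem.Chars.join PySem.Chars.splitOn
  rw [pv_join_splitOn_go _ (by decide) _ _ _ _ (Nat.le_succ _)]
  simp [List.intercalate]

-- ===== VERDICT (by name: the statement is the Claim_ definition above) =====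
theorem remove_sensitive_comments_py_spec : Claim_equal_remove_sensitive_comments_py := by
  intro code language _
  unfold Spec_remove_sensitive_comments_py
  unfold remove_sensitive_comments_py remove_sensitive_comments_py_alt
  simp only [pv_foldl_push_map, List.nil_append]
  by_cases h1 : PySem.Chars.lower language.toList ∈ ["python".toList, "bash".toList, "ruby".toList]
  · simp only [if_pos h1]
    rw [List.map_congr_left (fun l _ => pv_line_py language.toList l h1),
        pv_splitOn_lines, PySem.Chars.join, pv_scan_lines "#".toList (by decide)]
    simp
  · by_cases h2 : PySem.Chars.lower language.toList ∈ ["javascript".toList, "java".toList, "c".toList, "cpp".toList, "go".toList]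
    · simp only [if_neg h1, if_pos h2]
      rw [List.map_congr_left (fun l _ => pv_line_c language.toList l h1 h2),
          pv_splitOn_lines, PySem.Chars.join, pv_scan_lines "//".toList (by decide)]
      simp
    · simp only [if_neg h1, if_neg h2]
      rw [List.map_congr_left (fun l _ => pv_line_id language.toList l h1 h2), List.map_id',
          pv_join_splitOn, String.ofList_toList]
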